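-- pv_equiv track=rewrite | github.com/zfoteff/advent-of-code-2022 | src/aoc_2025/pkg/day2.py | part_one
-- ===== SOURCE A (Python) =====
-- from typing import List, Tuple
--
-- def part_one(puzzle_data: List[Tuple[int, int]]) -> int:
--     counter = 0
--
--     for start_range, end_range in puzzle_data:
--         for num in list(map(str, range(start_range, end_range + 1))):
--             num_dict = dict()
--
--             for digit in num:
--                 num_dict.setdefault(digit, 0)
--                 num_dict[digit] += 1
--
--             if sum(num_dict.values()) % len(num_dict) == 2:
--                 counter += 1
--
--     return counter
-- ===== SOURCE B (Python) =====
-- from typing import List, Tuple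
--
--
-- def _stats(n: int) -> Tuple[int, int]:
--     """Length of str(n) and its number of distinct characters, computed
--     arithmetically (digit bitmask + popcount) without building any string."""
--     neg = n < 0
--     m = -n if neg else n
--     mask = 0
--     length = 0
--     while True:
--         mask |= 1 << (m % 10)
--         length += 1
--         m //= 10
--         if m == 0:
--             break
--     distinct = bin(mask).count("1")
--     if neg:  # the leading '-' is one extra, always-new character
--         length += 1
--         distinct += 1
--     return length, distinct
--
--
-- def part_one(puzzle_data: List[Tuple[int, int]]) -> int:
--     total = 0
--     for start_range, end_range in puzzle_data:
--         for n in range(start_range, end_range + 1):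
--             length, distinct = _stats(n)
--             if length % distinct == 2:
--                 total += 1
--     return total
-- ===== Notes on version B (the rewrite author's own statement) =====
-- stated objective: alternative
-- what changed: Per number, A materializes str(n) and builds a per-character dict counter in an inner loop, then sums its values and takes len(dict); B never builds a string or a dict: it extracts the decimal digits arithmetically in one divmod loop, accumulating the length and a 10-bit distinct-digit bitmask, and gets the distinct count as the mask's popcount (plus one each for the sign character).
import Mathlib
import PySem

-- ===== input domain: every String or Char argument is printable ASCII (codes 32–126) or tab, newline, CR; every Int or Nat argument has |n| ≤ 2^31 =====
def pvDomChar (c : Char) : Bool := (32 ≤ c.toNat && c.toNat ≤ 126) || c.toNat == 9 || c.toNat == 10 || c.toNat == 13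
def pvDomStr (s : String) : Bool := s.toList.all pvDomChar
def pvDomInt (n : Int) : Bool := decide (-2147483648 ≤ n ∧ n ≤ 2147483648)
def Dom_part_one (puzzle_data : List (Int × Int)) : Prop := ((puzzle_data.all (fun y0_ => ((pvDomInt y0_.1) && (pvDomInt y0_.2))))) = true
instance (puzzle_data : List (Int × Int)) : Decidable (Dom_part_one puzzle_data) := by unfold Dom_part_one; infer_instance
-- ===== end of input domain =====

-- B replaces A's per-number str(n) + per-character dict counter by one arithmetic
-- divmod loop keeping a length count and a distinct-digit bitmask (popcount);
-- objective: alternative (same asymptotic cost, no string/dict building).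

-- ===== PORT A =====
def part_one (puzzle_data : List (Int × Int)) : Int :=
  puzzle_data.foldl (fun counter pr =>
    ((PySem.List.pyRange pr.1 (pr.2 + 1) 1).map PySem.Int.toStr).foldl (fun counter num =>
      let num_dict : PySem.Dict Char Int :=
        num.toList.foldl (fun num_dict digit =>
          let num_dict := num_dict.setdefault digit 0
          num_dict.insert digit (num_dict.getD digit 0 + 1)) PySem.Dict.empty
      if PySem.Int.mod num_dict.values.sum (num_dict.size : Int) = 2 then counter + 1
      else counter) counter) 0

-- ===== PORT B =====
-- bin(mask).count("1") of Source B, ported as a popcount by repeated halving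
def pyPopcount : Nat → Nat
  | 0 => 0
  | (n+1) => (n+1) % 2 + pyPopcount ((n+1)/2)
decreasing_by exact Nat.div_lt_self (Nat.succ_pos n) (by omega)

-- the while-loop of _stats: digit bitmask and digit count of m
def digitLoop (m : Nat) (mask : Nat) (length : Int) : Nat × Int :=
  let mask := mask ||| (1 <<< (m % 10))
  let length := length + 1
  if _h : m / 10 = 0 then (mask, length) else digitLoop (m / 10) mask length
termination_by m
decreasing_by exact Nat.div_lt_self (by omega) (by omega)

-- _stats of Source B
def stats (n : Int) : Int × Int :=
  let neg := decide (n < 0)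
  let m := n.natAbs
  let r := digitLoop m 0 0
  let distinct : Int := (pyPopcount r.1 : Int)
  if neg then (r.2 + 1, distinct + 1) else (r.2, distinct)

def part_one_alt (puzzle_data : List (Int × Int)) : Int :=
  puzzle_data.foldl (fun total pr =>
    (PySem.List.pyRange pr.1 (pr.2 + 1) 1).foldl (fun total n =>
      let s := stats n
      if PySem.Int.mod s.1 s.2 = 2 then total + 1 else total) total) 0

-- ===== PRECONDITION & SPEC =====
def Spec_part_one (puzzle_data : List (Int × Int)) (out : Int) : Prop := out = part_one_alt puzzle_data
instance (puzzle_data : List (Int × Int)) (out : Int) : Decidable (Spec_part_one puzzle_data out) := by unfold Spec_part_one; infer_instance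

-- ===== CLAIM (what is proved, stated in full; the proofs are below) =====
def Claim_equal_part_one : Prop := ∀ (puzzle_data : List (Int × Int)), Dom_part_one puzzle_data → Spec_part_one puzzle_data (part_one puzzle_data)

-- ===== LEMMAS AND PROOFS =====

-- decimal digits of m, least significant first, at least one (mirrors the do-while loop)
def pvDigits : Nat → List Nat
  | m => m % 10 :: (if _h : m / 10 = 0 then [] else pvDigits (m / 10))
termination_by m => m
decreasing_by exact Nat.div_lt_self (by omega) (by omega)

def orMaskR (l : List Nat) : Nat := l.foldr (fun d a => (1 <<< d) ||| a) 0

theorem pyPopcount_eq (n : Nat) : pyPopcount n = n % 2 + pyPopcount (n / 2) := by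
  cases n with
  | zero => simp [pyPopcount]
  | succ n => rw [pyPopcount]

theorem div2_or (a b : Nat) : (a ||| b) / 2 = a / 2 ||| b / 2 := by
  apply Nat.eq_of_testBit_eq
  intro i
  simp [Nat.testBit_div_two, Nat.testBit_or]

theorem mod2_eq_of_testBit (a b : Nat) (h : a.testBit 0 = b.testBit 0) : a % 2 = b % 2 := by
  simp only [Nat.testBit_zero] at h
  rcases Nat.mod_two_eq_zero_or_one a with h1 | h1 <;>
    rcases Nat.mod_two_eq_zero_or_one b with h2 | h2 <;> simp [h1, h2] at h ⊢

theorem or_eq_self_of_testBit (d m : Nat) (h : m.testBit d = true) : 2 ^ d ||| m = m := by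
  apply Nat.eq_of_testBit_eq
  intro i
  simp only [Nat.testBit_or, Nat.testBit_two_pow]
  by_cases hi : d = i
  · subst hi; simp [h]
  · simp [hi]

theorem pc_or_two_pow (d : Nat) : ∀ m : Nat, m.testBit d = false →
    pyPopcount (2 ^ d ||| m) = pyPopcount m + 1 := by
  induction d with
  | zero =>
    intro m h
    simp only [Nat.testBit_zero, decide_eq_false_iff_not] at h
    have ht : (2 ^ 0 ||| m).testBit 0 = true := by
      simp
    simp only [Nat.testBit_zero, decide_eq_true_eq] at ht
    have hdiv : (2 ^ 0 ||| m) / 2 = m / 2 := by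
      rw [div2_or]; norm_num
    rw [pyPopcount_eq (2 ^ 0 ||| m), ht, hdiv, pyPopcount_eq m]
    omega
  | succ d ih =>
    intro m h
    have hmod : (2 ^ (d+1) ||| m) % 2 = m % 2 := by
      apply mod2_eq_of_testBit
      simp
    have hpow : 2 ^ (d+1) / 2 = 2 ^ d := by
      rw [Nat.pow_succ]; omega
    have hdiv : (2 ^ (d+1) ||| m) / 2 = 2 ^ d ||| m / 2 := by
      rw [div2_or, hpow]
    have hbit : (m / 2).testBit d = false := by
      rw [Nat.testBit_div_two]; exact h
    rw [pyPopcount_eq (2 ^ (d+1) ||| m), hmod, hdiv, ih _ hbit, pyPopcount_eq m]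
    omega

theorem testBit_orMaskR (l : List Nat) (i : Nat) :
    (orMaskR l).testBit i = decide (i ∈ l) := by
  induction l with
  | nil => simp [orMaskR]
  | cons d t ih =>
    have h0 : orMaskR (d :: t) = (1 <<< d) ||| orMaskR t := rfl
    rw [h0, Nat.testBit_or, ih, Nat.shiftLeft_eq, one_mul, Nat.testBit_two_pow]
    simp [eq_comm]

theorem pc_orMaskR (l : List Nat) : pyPopcount (orMaskR l) = l.toFinset.card := by
  induction l with
  | nil => simp [orMaskR, pyPopcount]
  | cons d t ih =>
    have hor : orMaskR (d :: t) = 2 ^ d ||| orMaskR t := by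
      have h0 : orMaskR (d :: t) = (1 <<< d) ||| orMaskR t := rfl
      rw [h0, Nat.shiftLeft_eq, one_mul]
    by_cases hd : d ∈ t
    · have hb : (orMaskR t).testBit d = true := by
        rw [testBit_orMaskR]; simpa using hd
      rw [hor, or_eq_self_of_testBit _ _ hb, ih]
      simp [List.toFinset_cons, Finset.insert_eq_self.2 (List.mem_toFinset.2 hd)]
    · have hb : (orMaskR t).testBit d = false := by
        rw [testBit_orMaskR]; simpa using hd
      rw [hor, pc_or_two_pow _ _ hb, ih]
      rw [List.toFinset_cons, Finset.card_insert_of_notMem (by simpa using hd)]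

theorem foldl_or_eq (l : List Nat) : ∀ mask : Nat,
    l.foldl (fun a d => a ||| (1 <<< d)) mask = mask ||| orMaskR l := by
  induction l with
  | nil => intro mask; simp [orMaskR]
  | cons d t ih =>
    intro mask
    have h0 : orMaskR (d :: t) = (1 <<< d) ||| orMaskR t := rfl
    rw [List.foldl_cons, ih, h0, Nat.or_assoc]

theorem digitLoop_eq (m : Nat) : ∀ (mask : Nat) (len : Int),
    digitLoop m mask len =
      ((pvDigits m).foldl (fun a d => a ||| (1 <<< d)) mask,
       len + ((pvDigits m).length : Int)) := by
  induction m using pvDigits.induct with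
  | _ m m' ih =>
    intro mask len
    rw [digitLoop, pvDigits]
    by_cases h : m / 10 = 0
    · simp [h]
    · simp only [dif_neg h]
      rw [ih h]
      simp only [List.foldl_cons, List.length_cons, Prod.mk.injEq]
      refine ⟨rfl, by push_cast; ring⟩

theorem toDigitsCore_eq (fuel : Nat) : ∀ (m : Nat) (acc : List Char), m < fuel →
    Nat.toDigitsCore 10 fuel m acc = ((pvDigits m).map Nat.digitChar).reverse ++ acc := by
  induction fuel with
  | zero => intro m acc h; omega
  | succ f ih =>
    intro m acc h
    rw [pvDigits]
    simp only [Nat.toDigitsCore]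
    by_cases h0 : m / 10 = 0
    · simp [h0]
    · have hm : m / 10 < f := by
        have h1 : 0 < m := by omega
        have := Nat.div_lt_self h1 (show 1 < 10 by omega)
        omega
      simp only [h0]
      rw [ih _ _ hm]
      simp

theorem toChars_eq (n : Int) :
    PySem.Int.toChars n =
      (if n < 0 then ['-'] else []) ++ ((pvDigits n.natAbs).map Nat.digitChar).reverse := by
  unfold PySem.Int.toChars Nat.toDigits
  by_cases h : n < 0
  · simp only [if_pos h]
    rw [toDigitsCore_eq _ _ _ (Nat.lt_succ_self _)]
    simp
  · simp only [if_neg h]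
    have h2 : n.toNat = n.natAbs := by omega
    rw [h2, toDigitsCore_eq _ _ _ (Nat.lt_succ_self _)]
    simp

theorem pvDigits_lt (m : Nat) : ∀ d ∈ pvDigits m, d < 10 := by
  induction m using pvDigits.induct with
  | _ m m' ih =>
    rw [pvDigits]
    intro d hd
    by_cases h : m / 10 = 0
    · simp [h] at hd; omega
    · simp only [dif_neg h, List.mem_cons] at hd
      rcases hd with h1 | h1
      · omega
      · exact ih h d h1

theorem digitChar_ne_dash (d : Nat) (h : d < 10) : Nat.digitChar d ≠ '-' := by
  interval_cases d <;> decide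

theorem digitChar_injOn (a b : Nat) (ha : a < 10) (hb : b < 10)
    (h : Nat.digitChar a = Nat.digitChar b) : a = b := by
  interval_cases a <;> interval_cases b <;> first | rfl | (exfalso; revert h; decide)

theorem setCard {α : Type} [DecidableEq α] [BEq α] [LawfulBEq α] (l : List α) :
    (PySem.Set.ofList l : List α).length = l.toFinset.card := by
  have hnd : (PySem.Set.ofList l : List α).Nodup := PySem.Set.nodup_ofList l
  have hfin : (PySem.Set.ofList l : List α).toFinset = l.toFinset := by
    ext x
    simp only [List.mem_toFinset]
    exact PySem.Set.mem_ofList l x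
  rw [← List.toFinset_card_of_nodup hnd, hfin]

-- the distinct-character count of the digit-character list is the distinct-digit count
theorem card_map_digitChar (m : Nat) :
    ((pvDigits m).map Nat.digitChar).toFinset.card = (pvDigits m).toFinset.card := by
  have himg : ((pvDigits m).map Nat.digitChar).toFinset
      = (pvDigits m).toFinset.image Nat.digitChar := by
    ext c; simp
  rw [himg]
  apply Finset.card_image_of_injOn
  intro a ha b hb h
  simp only [List.coe_toFinset, Set.mem_setOf_eq] at ha hb
  exact digitChar_injOn a b (pvDigits_lt m a ha) (pvDigits_lt m b hb) h

theorem dash_not_mem_map (m : Nat) : '-' ∉ (pvDigits m).map Nat.digitChar := by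
  intro h
  rcases List.mem_map.1 h with ⟨d, hd, hdc⟩
  exact digitChar_ne_dash d (pvDigits_lt m d hd) hdc

-- A's inner dict loop step is `d[k] = d.get(k, 0) + 1`
theorem step_eq (d : PySem.Dict Char Int) (k : Char) :
    ((d.setdefault k 0).insert k ((d.setdefault k 0).getD k 0 + 1)) = d.modify k 0 (· + 1) := by
  cases h : d.contains k
  · rw [PySem.Dict.setdefault_of_not_contains _ _ h]
    rw [PySem.Dict.getD_insert_self, PySem.Dict.insert_insert_self]
    unfold PySem.Dict.modify
    rw [PySem.Dict.getD_of_not_contains _ _ h]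
  · rw [PySem.Dict.setdefault_of_contains _ _ h]
    rfl

theorem foldA_eq_counter (cs : List Char) :
    cs.foldl (fun num_dict digit =>
      let num_dict := num_dict.setdefault digit 0
      num_dict.insert digit (num_dict.getD digit 0 + 1)) PySem.Dict.empty
      = PySem.Dict.counter cs := by
  rw [PySem.Dict.counter_eq_foldl]
  apply List.foldl_ext
  intro d k _
  exact step_eq d k

theorem size_eq_keys_length {κ ν : Type} [BEq κ] (d : PySem.Dict κ ν) :
    d.size = d.keys.length := by
  simp [PySem.Dict.size, PySem.Dict.keys]

theorem sum_values_counter (cs : List Char) :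
    (PySem.Dict.counter cs).values.sum = (cs.length : Int) := by
  rw [PySem.Dict.values_eq_map_keys _ (PySem.Dict.nodup_keys_counter cs) 0,
      PySem.Dict.keys_counter]
  simp only [PySem.Dict.getD_counter]
  have hperm : (PySem.Set.ofList cs : List Char).Perm cs.dedup :=
    (List.perm_ext_iff_of_nodup (PySem.Set.nodup_ofList cs) cs.nodup_dedup).2
      (fun a => by rw [PySem.Set.mem_ofList, List.mem_dedup])
  have h1 : ((PySem.Set.ofList cs : List Char).map fun k => ((List.count k cs : Nat) : Int)).sum
      = (cs.dedup.map fun k => ((List.count k cs : Nat) : Int)).sum :=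
    (hperm.map _).sum_eq
  have h2 : (cs.dedup.map fun k => ((List.count k cs : Nat) : Int)).sum
      = (((cs.dedup.map fun k => List.count k cs).sum : Nat) : Int) := by
    rw [Nat.cast_list_sum, List.map_map]
    rfl
  rw [h1, h2, List.sum_map_count_dedup_eq_length]

theorem size_counter (cs : List Char) :
    (PySem.Dict.counter cs).size = (PySem.Set.ofList cs : List Char).length := by
  rw [size_eq_keys_length, PySem.Dict.keys_counter]

-- the two per-number statistics agree
theorem stats_eq (n : Int) :
    stats n = (((PySem.Int.toStr n).toList.length : Int),
               ((PySem.Set.ofList (PySem.Int.toStr n).toList : List Char).length : Int)) := by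
  have hchars : (PySem.Int.toStr n).toList = PySem.Int.toChars n := PySem.Int.toList_toStr n
  rw [hchars, toChars_eq]
  simp only [stats]
  rw [digitLoop_eq, foldl_or_eq]
  have hz : (0 : Nat) ||| orMaskR (pvDigits n.natAbs) = orMaskR (pvDigits n.natAbs) := by
    simp
  rw [hz, pc_orMaskR]
  rw [setCard]
  by_cases h : n < 0
  · simp only [h, decide_true, if_true]
    have hfin : (('-' :: ((pvDigits n.natAbs).map Nat.digitChar).reverse)).toFinset.card
        = (pvDigits n.natAbs).toFinset.card + 1 := by
      rw [List.toFinset_cons,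
          Finset.card_insert_of_notMem (by
            rw [List.mem_toFinset, List.mem_reverse]
            exact dash_not_mem_map n.natAbs),
          List.toFinset_reverse, card_map_digitChar]
    simp only [List.singleton_append]
    rw [hfin]
    simp only [Prod.mk.injEq, List.length_cons, List.length_reverse, List.length_map]
    refine ⟨by push_cast; ring, by push_cast; ring⟩
  · simp only [h, decide_false, if_false, Bool.false_eq_true]
    simp only [List.nil_append]
    rw [List.toFinset_reverse, card_map_digitChar]
    simp only [Prod.mk.injEq, List.length_reverse, List.length_map]
    refine ⟨by ring, trivial⟩

-- ===== VERDICT (by name: the statement is the Claim_ definition above) =====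
theorem part_one_spec : Claim_equal_part_one := by
  intro pd _
  unfold Spec_part_one part_one part_one_alt
  apply List.foldl_ext
  intro acc pr _
  rw [List.foldl_map]
  apply List.foldl_ext
  intro c n _
  simp only [foldA_eq_counter, stats_eq, sum_values_counter, size_counter]
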